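-- pv_equiv track=rewrite | github.com/elifBalci/connect4-ai-player | evaluation.py | process_diagonal
-- ===== SOURCE A (Python) =====
-- def process_diagonal(diagonal_list, player):
--     max_consecutive = 0
--     max_for_element = 0
--     consecutive = 0
--     list_of_consecutive = []
--     for list_element in diagonal_list:
--         for element in list_element:
--             for e in element:
--                 if e == player:
--                     consecutive = consecutive + 1
--                     max_consecutive = max(max_consecutive, consecutive)
--                 else:
--                     consecutive = 0
--         consecutive = 0
--         if max_consecutive != 0:
--             list_of_consecutive.append(max_consecutive)
--         max_for_element = max(max_consecutive, max_for_element)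
--         max_consecutive = 0
--     if list_of_consecutive:
--         max_for_element = max(list_of_consecutive)
--     return list_of_consecutive, max_for_element
-- ===== SOURCE B (Python) =====
-- def process_diagonal(diagonal_list, player):
--     list_of_consecutive = []
--     for list_element in diagonal_list:
--         flat = [e for element in list_element for e in element]
--         boundaries = [-1] + [i for i, e in enumerate(flat) if e != player] + [len(flat)]
--         best = max(b - a - 1 for a, b in zip(boundaries, boundaries[1:]))
--         if best:
--             list_of_consecutive.append(best)
--     max_for_element = max(list_of_consecutive) if list_of_consecutive else 0
--     return list_of_consecutive, max_for_element
-- ===== Notes on version B (the rewrite author's own statement) =====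
-- stated objective: alternative
-- what changed: Computes each diagonal's best run arithmetically as the maximum gap between consecutive non-player positions (sentinel boundaries -1 and len, zip of adjacent boundaries) in staged passes, instead of A's running counter/reset/max state machine.
import Mathlib
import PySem

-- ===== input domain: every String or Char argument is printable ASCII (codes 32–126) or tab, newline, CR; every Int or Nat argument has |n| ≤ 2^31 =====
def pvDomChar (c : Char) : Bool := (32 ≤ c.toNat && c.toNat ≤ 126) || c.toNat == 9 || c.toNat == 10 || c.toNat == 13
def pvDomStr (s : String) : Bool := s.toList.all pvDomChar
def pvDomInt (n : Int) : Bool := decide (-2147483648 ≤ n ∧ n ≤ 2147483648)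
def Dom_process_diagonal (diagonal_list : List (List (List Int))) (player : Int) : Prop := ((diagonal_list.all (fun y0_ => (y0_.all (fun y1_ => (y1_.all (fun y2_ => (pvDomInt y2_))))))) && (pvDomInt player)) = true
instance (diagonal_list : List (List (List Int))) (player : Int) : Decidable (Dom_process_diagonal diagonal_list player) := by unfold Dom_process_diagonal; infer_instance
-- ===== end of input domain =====

-- B computes each row's best run as the maximum gap between consecutive non-player positions
-- (with sentinel boundaries) instead of A's running-counter state machine; objective: alternative.
-- ===== PORT A =====
def stepA (player : Int) (s : Int × Int) (e : Int) : Int × Int :=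
  if e = player then (max s.1 (s.2 + 1), s.2 + 1) else (s.1, 0)

-- the body of A's outer `for list_element in diagonal_list` loop
-- state: (max_consecutive, max_for_element, consecutive, list_of_consecutive)
def outerA (player : Int) (s : Int × Int × Int × List Int) (list_element : List (List Int)) :
    Int × Int × Int × List Int :=
  let p := list_element.foldl (fun q element => element.foldl (stepA player) q) (s.1, s.2.2.1)
  let mc := p.1
  ((0 : Int), max mc s.2.1, (0 : Int), if mc ≠ 0 then s.2.2.2 ++ [mc] else s.2.2.2)

def process_diagonal (diagonal_list : List (List (List Int))) (player : Int) : List Int × Int :=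
  let st := diagonal_list.foldl (outerA player) (0, 0, 0, [])
  (st.2.2.2,
    match st.2.2.2 with
    | [] => st.2.1               -- list_of_consecutive empty: keep max_for_element
    | h :: t => t.foldl max h)   -- max(list_of_consecutive) on a nonempty list

-- ===== PORT B =====
-- `[i for i, e in enumerate(flat) if e != player]` starting at index i
def mismatches (player : Int) (i : Int) (xs : List Int) : List Int :=
  match xs with
  | [] => []
  | x :: t => if x ≠ player then i :: mismatches player (i + 1) t
              else mismatches player (i + 1) t

-- `b - a - 1 for a, b in zip(bs, bs[1:])`
def gapList (bs : List Int) : List Int :=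
  (bs.zip bs.tail).map (fun p => p.2 - p.1 - 1)

-- Python max over a possibly empty list with default 0 (B's lists here are nonempty)
def pyMaxD0 (l : List Int) : Int :=
  match l with
  | [] => 0
  | h :: t => t.foldl max h

def bestRun (xs : List Int) (player : Int) : Int :=
  pyMaxD0 (gapList ((-1) :: mismatches player 0 xs ++ [(xs.length : Int)]))

-- the body of B's `for list_element in diagonal_list` loop
def outerB (player : Int) (loc : List Int) (list_element : List (List Int)) : List Int :=
  if bestRun (list_element.flatMap id) player ≠ 0 then
    loc ++ [bestRun (list_element.flatMap id) player]
  else loc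

def process_diagonal_alt (diagonal_list : List (List (List Int))) (player : Int) : List Int × Int :=
  let loc := diagonal_list.foldl (outerB player) []
  (loc,
    match loc with
    | [] => 0
    | h :: t => t.foldl max h)

-- ===== PRECONDITION & SPEC =====
def Spec_process_diagonal (diagonal_list : List (List (List Int))) (player : Int) (out : List Int × Int) : Prop := out = process_diagonal_alt diagonal_list player
instance (diagonal_list : List (List (List Int))) (player : Int) (out : List Int × Int) : Decidable (Spec_process_diagonal diagonal_list player out) := by unfold Spec_process_diagonal; infer_instance

-- ===== CLAIM (what is proved, stated in full; the proofs are below) =====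
def Claim_equal_process_diagonal : Prop := ∀ (diagonal_list : List (List (List Int))) (player : Int), Dom_process_diagonal diagonal_list player → Spec_process_diagonal diagonal_list player (process_diagonal diagonal_list player)

-- ===== LEMMAS AND PROOFS =====

-- best run of `player` in ys, given a carry of c already-matched marks just before ys
def bestFrom (player : Int) (c : Int) (ys : List Int) : Int :=
  match ys with
  | [] => c
  | y :: t => if y = player then max (c + 1) (bestFrom player (c + 1) t)
              else max c (bestFrom player 0 t)

-- length of the player-run ending at the end of ys, with carry c
def endC (player : Int) (c : Int) (ys : List Int) : Int :=
  match ys with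
  | [] => c
  | y :: t => if y = player then endC player (c + 1) t else endC player 0 t

theorem bestFrom_cons_pos (player c y : Int) (t : List Int) (hy : y = player) :
    bestFrom player c (y :: t) = max (c + 1) (bestFrom player (c + 1) t) := by
  rw [bestFrom, if_pos hy]

theorem bestFrom_cons_neg (player c y : Int) (t : List Int) (hy : ¬ y = player) :
    bestFrom player c (y :: t) = max c (bestFrom player 0 t) := by
  rw [bestFrom, if_neg hy]

theorem bestFrom_ge (player c : Int) (ys : List Int) : c ≤ bestFrom player c ys := by
  induction ys generalizing c with
  | nil => simp [bestFrom]
  | cons y t ih =>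
    rw [bestFrom]
    split
    · exact le_trans (by omega) (le_max_left _ _)
    · exact le_max_left _ _

theorem bestFrom_nonneg (player c : Int) (hc : 0 ≤ c) (ys : List Int) :
    0 ≤ bestFrom player c ys := le_trans hc (bestFrom_ge _ _ _)

-- A's counter loop computes (max-so-far ⊔ best run with carry, run ending at the end)
theorem foldl_stepA (player : Int) (ys : List Int) :
    ∀ mc c, 0 ≤ c → c ≤ mc →
    ys.foldl (stepA player) (mc, c) = (max mc (bestFrom player c ys), endC player c ys) := by
  induction ys with
  | nil =>
    intro mc c h0 hle
    simp [bestFrom, endC]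
    omega
  | cons y t ih =>
    intro mc c h0 hle
    by_cases hy : y = player
    · simp only [List.foldl_cons, stepA, if_pos hy, bestFrom_cons_pos player c y t hy, endC]
      rw [ih (max mc (c + 1)) (c + 1) (by omega) (le_max_right _ _)]
      congr 1
      omega
    · simp only [List.foldl_cons, stepA, if_neg hy, bestFrom_cons_neg player c y t hy, endC]
      rw [ih mc 0 le_rfl (by omega)]
      congr 1
      omega

theorem foldl_max_max (a b : Int) (l : List Int) :
    l.foldl max (max a b) = max a (l.foldl max b) := by
  induction l generalizing b with
  | nil => simp
  | cons h t ih => simp only [List.foldl_cons, max_assoc]; exact ih _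

theorem pyMaxD0_cons (a : Int) (l : List Int) (ha : 0 ≤ a) :
    pyMaxD0 (a :: l) = max a (pyMaxD0 l) := by
  cases l with
  | nil => simp [pyMaxD0]; omega
  | cons h t =>
    simp only [pyMaxD0, List.foldl_cons]
    rw [← foldl_max_max]

theorem gapList_cons_cons (a b : Int) (l : List Int) :
    gapList (a :: b :: l) = (b - a - 1) :: gapList (b :: l) := by
  simp [gapList]

-- the maximum gap between consecutive boundary positions equals the counter-machine best
theorem gap_inv (player : Int) (xs : List Int) :
    ∀ i last : Int, last < i →
    pyMaxD0 (gapList (last :: (mismatches player i xs ++ [i + (xs.length : Int)]))) =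
      bestFrom player (i - last - 1) xs := by
  induction xs with
  | nil =>
    intro i last _
    simp [mismatches, gapList, pyMaxD0, bestFrom]
  | cons x t ih =>
    intro i last hlt
    have hlen : i + ((x :: t).length : Int) = (i + 1) + (t.length : Int) := by
      simp only [List.length_cons]; push_cast; ring
    by_cases hx : x = player
    · rw [show mismatches player i (x :: t) = mismatches player (i + 1) t from by
          rw [mismatches, if_neg (by simpa using hx)]]
      rw [hlen, ih (i + 1) last (by omega), bestFrom_cons_pos player _ x t hx]
      rw [show i + 1 - last - 1 = i - last - 1 + 1 from by ring]
      have := bestFrom_ge player (i - last - 1 + 1) t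
      omega
    · rw [show mismatches player i (x :: t) = i :: mismatches player (i + 1) t from by
          rw [mismatches, if_pos (by simpa using hx)]]
      simp only [List.cons_append]
      rw [hlen, gapList_cons_cons, pyMaxD0_cons _ _ (by omega),
        ih (i + 1) i (by omega), bestFrom_cons_neg player _ x t hx]
      rw [show i + 1 - i - 1 = (0 : Int) from by ring]

theorem bestRun_eq_bestFrom (player : Int) (xs : List Int) :
    bestRun xs player = bestFrom player 0 xs := by
  unfold bestRun
  have h := gap_inv player xs 0 (-1) (by omega)
  rw [show (0 : Int) + (xs.length : Int) = (xs.length : Int) from by ring] at h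
  simp only [List.cons_append] at h ⊢
  rw [h]
  norm_num

-- A's nested inner loops are a single pass over the flattened list_element
theorem foldl_nested_flatMap (player : Int) (le : List (List Int)) :
    ∀ p : Int × Int,
    le.foldl (fun q element => element.foldl (stepA player) q) p =
      (le.flatMap id).foldl (stepA player) p := by
  induction le with
  | nil => intro p; simp
  | cons e rest ih =>
    intro p
    simp only [List.foldl_cons, List.flatMap_cons, id, List.foldl_append, ih]

-- B's accumulator only ever grows on the right
theorem outerB_append (player : Int) (dl : List (List (List Int))) :
    ∀ loc0, dl.foldl (outerB player) loc0 = loc0 ++ dl.foldl (outerB player) [] := by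
  induction dl with
  | nil => intro loc0; simp
  | cons le rest ih =>
    intro loc0
    simp only [List.foldl_cons]
    rw [ih (outerB player loc0 le), ih (outerB player [] le)]
    unfold outerB
    split
    · simp
    · simp

-- the loop invariant tying A's four-component state to B's accumulator
theorem outer_inv (player : Int) (dl : List (List (List Int))) :
    ∀ mfe0 loc0, 0 ≤ mfe0 →
    dl.foldl (outerA player) (0, mfe0, 0, loc0) =
      (0, (dl.foldl (outerB player) []).foldl max mfe0, 0,
        loc0 ++ dl.foldl (outerB player) []) := by
  induction dl with
  | nil => intro mfe0 loc0 h; simp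
  | cons le rest ih =>
    intro mfe0 loc0 h
    have hbest :
        (le.foldl (fun q element => element.foldl (stepA player) q) ((0 : Int), (0 : Int))).1 =
          bestRun (le.flatMap id) player := by
      rw [foldl_nested_flatMap player le (0, 0),
        foldl_stepA player (le.flatMap id) 0 0 le_rfl le_rfl,
        bestRun_eq_bestFrom]
      have := bestFrom_nonneg player 0 le_rfl (le.flatMap id)
      simp only
      omega
    have hstep : outerA player (0, mfe0, 0, loc0) le =
        (0, max (bestRun (le.flatMap id) player) mfe0, 0,
          if bestRun (le.flatMap id) player ≠ 0 then loc0 ++ [bestRun (le.flatMap id) player]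
          else loc0) := by
      unfold outerA
      simp only [hbest]
    have hnn : 0 ≤ bestRun (le.flatMap id) player := by
      rw [bestRun_eq_bestFrom]
      exact bestFrom_nonneg player 0 le_rfl _
    simp only [List.foldl_cons, hstep]
    rw [ih (max (bestRun (le.flatMap id) player) mfe0) _ (by omega)]
    rw [show rest.foldl (outerB player) (outerB player [] le) =
          outerB player [] le ++ rest.foldl (outerB player) [] from outerB_append player rest _]
    unfold outerB
    by_cases hb : bestRun (le.flatMap id) player ≠ 0
    · simp only [if_pos hb, List.foldl_append, List.foldl_cons, List.foldl_nil,
        List.nil_append, List.append_assoc]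
      rw [max_comm (bestRun (List.flatMap id le) player) mfe0]
    · simp only [if_neg hb, List.nil_append]
      simp only [ne_eq, not_not] at hb
      rw [hb, show max (0 : Int) mfe0 = mfe0 by omega]

-- ===== VERDICT (by name: the statement is the Claim_ definition above) =====
theorem process_diagonal_spec : Claim_equal_process_diagonal := by
  intro diagonal_list player _
  unfold Spec_process_diagonal process_diagonal process_diagonal_alt
  rw [outer_inv player diagonal_list 0 [] le_rfl]
  simp only [List.nil_append]
  cases h : diagonal_list.foldl (outerB player) [] with
  | nil => simp
  | cons a t => simp
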